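-- pv_equiv track=rewrite | github.com/diku-dk/futhark | rts/python/memory.py | lmad_contiguous_search
-- ===== SOURCE A (Python) =====
-- def lmad_contiguous_search(checked, expected, strides, shape, used):
--     for i in range(len(strides)):
--         for j in range(len(strides)):
--             if not used[j] and strides[j] == expected and strides[j] >= 0:
--                 used[j] = True
--                 if checked + 1 == len(strides) or lmad_contiguous_search(
--                     checked + 1, expected * shape[j], strides, shape, used
--                 ):
--                     return True
--                 used[j] = False
--     return False
-- ===== SOURCE B (Python) =====
-- def lmad_contiguous_search(checked, expected, strides, shape, used):
--     n = len(strides)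
--     avail = {}
--     for j in range(n):
--         if not used[j]:
--             key = (strides[j], shape[j])
--             avail[key] = avail.get(key, 0) + 1
--     def go(checked, expected):
--         for (s, sh), c in list(avail.items()):
--             if c > 0 and s == expected and s >= 0:
--                 avail[(s, sh)] = c - 1
--                 if checked + 1 == n or go(checked + 1, expected * sh):
--                     return True
--                 avail[(s, sh)] = c
--         return False
--     return go(checked, expected)
-- ===== Notes on version B (the rewrite author's own statement) =====
-- stated objective: faster
-- what changed: B drops A's redundant outer loop and replaces backtracking over individual indices by one backtracking search over a precomputed dict counting (stride, shape) pairs, so duplicate dimensions are tried once instead of once per duplicate index; Pre_ requires used to cover all stride indices and shape to cover every unused stride index, outside that A usually raises IndexError but can occasionally return without touching the missing entries, while B scans all indices of used/shape upfront and raises IndexError itself there.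
-- outside the precondition, e.g. on lmad_contiguous_search(0, 4, [5], [], [False]): A returns False, B raises IndexError; on lmad_contiguous_search(1, 7, [7, 9], [2, 2], [False]): A returns True, B raises IndexError
import Mathlib
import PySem

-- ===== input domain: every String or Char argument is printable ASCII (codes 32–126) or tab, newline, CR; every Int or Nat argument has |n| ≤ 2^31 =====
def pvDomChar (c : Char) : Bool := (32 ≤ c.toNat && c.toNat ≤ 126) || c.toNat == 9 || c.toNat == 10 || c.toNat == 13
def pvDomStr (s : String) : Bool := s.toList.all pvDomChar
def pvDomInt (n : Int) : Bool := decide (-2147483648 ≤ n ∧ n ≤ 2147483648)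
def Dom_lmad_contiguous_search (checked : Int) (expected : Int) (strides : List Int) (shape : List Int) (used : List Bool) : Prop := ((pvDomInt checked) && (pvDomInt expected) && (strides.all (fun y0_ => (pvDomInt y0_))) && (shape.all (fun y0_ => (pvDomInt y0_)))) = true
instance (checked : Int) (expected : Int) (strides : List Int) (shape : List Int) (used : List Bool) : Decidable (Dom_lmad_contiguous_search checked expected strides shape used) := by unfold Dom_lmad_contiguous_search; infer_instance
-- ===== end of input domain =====

-- B replaces A's redundant outer loop and per-index backtracking by one backtracking search over a
-- precomputed dict counting (stride, shape) pairs, so duplicate dimensions are tried once (objective: faster).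
-- NOTE: Python A mutates `used` in place (entries stay True on success); the equivalence proved here is
-- about the RETURN value only (Python B does not mutate its arguments).

-- ===== PORT A =====
-- inner loop `for j in range(len(strides))`, threading the mutable `used`;
-- `rec` is the recursive call (one less fuel); out-of-range used[j]/shape[j] (a Python IndexError,
-- excluded by Pre_) read a default.
def pvAInner (rec : Int → Int → List Bool → Bool × List Bool)
    (checked expected : Int) (strides shape : List Int) :
    List Bool → List Nat → Bool × List Bool
  | used, [] => (false, used)
  | used, j :: js =>
    if used.getD j true = false ∧ strides.getD j 0 = expected ∧ strides.getD j 0 ≥ 0 then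
      let used1 := used.set j true
      if checked + 1 = (strides.length : Int) then (true, used1)
      else
        match rec (checked + 1) (expected * shape.getD j 0) used1 with
        | (true, u2) => (true, u2)
        | (false, u2) => pvAInner rec checked expected strides shape (u2.set j false) js
    else pvAInner rec checked expected strides shape used js

-- outer loop `for i in range(len(strides))` (its body does not use i; the count is the second Nat)
def pvAOuter (rec : Int → Int → List Bool → Bool × List Bool)
    (checked expected : Int) (strides shape : List Int) :
    List Bool → Nat → Bool × List Bool
  | used, 0 => (false, used)
  | used, i + 1 =>
    match pvAInner rec checked expected strides shape used (List.range strides.length) with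
    | (true, u) => (true, u)
    | (false, u) => pvAOuter rec checked expected strides shape u i

-- the recursive function itself; fuel strides.length + 1 bounds the recursion depth
-- (every recursive Python call has marked one more index used)
def pvAGo (strides shape : List Int) : Nat → Int → Int → List Bool → Bool × List Bool
  | 0, _, _, used => (false, used)
  | fuel + 1, checked, expected, used =>
    pvAOuter (pvAGo strides shape fuel) checked expected strides shape used strides.length

def lmad_contiguous_search (checked : Int) (expected : Int) (strides : List Int) (shape : List Int) (used : List Bool) : Bool :=
  (pvAGo strides shape (strides.length + 1) checked expected used).1

-- ===== PORT B =====
-- `avail[key] = avail.get(key, 0) + 1` over the unused indices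
def pvBuildAvail (strides shape : List Int) (used : List Bool) : PySem.Dict (Int × Int) Int :=
  (List.range strides.length).foldl
    (fun d j =>
      if used.getD j true = false then
        d.insert (strides.getD j 0, shape.getD j 0)
          (d.getD (strides.getD j 0, shape.getD j 0) 0 + 1)
      else d)
    PySem.Dict.empty

-- `for (s, sh), c in list(avail.items())`: the snapshot list is walked while the dict is threaded
def pvBInner (rec : Int → Int → PySem.Dict (Int × Int) Int → Bool × PySem.Dict (Int × Int) Int)
    (checked expected : Int) (n : Nat) :
    PySem.Dict (Int × Int) Int → List ((Int × Int) × Int) → Bool × PySem.Dict (Int × Int) Int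
  | d, [] => (false, d)
  | d, ((s, sh), c) :: items =>
    if 0 < c ∧ s = expected ∧ s ≥ 0 then
      let d1 := d.insert (s, sh) (c - 1)
      if checked + 1 = (n : Int) then (true, d1)
      else
        match rec (checked + 1) (expected * sh) d1 with
        | (true, d2) => (true, d2)
        | (false, d2) => pvBInner rec checked expected n (d2.insert (s, sh) c) items
    else pvBInner rec checked expected n d items

-- `go`; same fuel bound as A's port
def pvBGo (n : Nat) : Nat → Int → Int → PySem.Dict (Int × Int) Int → Bool × PySem.Dict (Int × Int) Int
  | 0, _, _, d => (false, d)
  | fuel + 1, checked, expected, d =>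
    pvBInner (pvBGo n fuel) checked expected n d d.items

def lmad_contiguous_search_alt (checked : Int) (expected : Int) (strides : List Int) (shape : List Int) (used : List Bool) : Bool :=
  (pvBGo strides.length (strides.length + 1) checked expected (pvBuildAvail strides shape used)).1

-- ===== PRECONDITION & SPEC =====
-- Pre_ requires `used` to cover all stride indices and `shape` to cover every unused stride index: outside
-- that A usually raises IndexError, but can return (True before reaching the missing `used` entry, or False
-- when no stride matches and shape is never read), while B scans all indices of used, and shape at every
-- unused index, upfront and raises IndexError itself there.
def Pre_lmad_contiguous_search (checked : Int) (expected : Int) (strides : List Int) (shape : List Int) (used : List Bool) : Prop :=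
  strides.length ≤ used.length ∧
    ∀ j < strides.length, used.getD j true = false → j < shape.length
instance (checked : Int) (expected : Int) (strides : List Int) (shape : List Int) (used : List Bool) : Decidable (Pre_lmad_contiguous_search checked expected strides shape used) := by unfold Pre_lmad_contiguous_search; infer_instance

def pvWitness_lmad_contiguous_search : Int × Int × List Int × List Int × List Bool :=
  (0, 1, [1, 2], [2, 3], [false, false])

def Spec_lmad_contiguous_search (checked : Int) (expected : Int) (strides : List Int) (shape : List Int) (used : List Bool) (out : Bool) : Prop := out = lmad_contiguous_search_alt checked expected strides shape used
instance (checked : Int) (expected : Int) (strides : List Int) (shape : List Int) (used : List Bool) (out : Bool) : Decidable (Spec_lmad_contiguous_search checked expected strides shape used out) := by unfold Spec_lmad_contiguous_search; infer_instance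

-- ===== CLAIM (what is proved, stated in full; the proofs are below) =====
def Claim_equal_lmad_contiguous_search : Prop := ∀ (checked : Int) (expected : Int) (strides : List Int) (shape : List Int) (used : List Bool), Dom_lmad_contiguous_search checked expected strides shape used → Pre_lmad_contiguous_search checked expected strides shape used → Spec_lmad_contiguous_search checked expected strides shape used (lmad_contiguous_search checked expected strides shape used)

-- ===== LEMMAS AND PROOFS =====

-- the (stride, shape) key of index j
def pvKey (strides shape : List Int) (j : Nat) : Int × Int :=
  (strides.getD j 0, shape.getD j 0)

-- multiset of keys of the still-unused indices, as a count function
def pvCnt (strides shape : List Int) (used : List Bool) (k : Int × Int) : Int :=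
  ((List.range strides.length).countP
    (fun j => !used.getD j true && decide (pvKey strides shape j = k)) : Int)

-- the dict represents exactly that multiset
def pvR (strides shape : List Int) (used : List Bool) (d : PySem.Dict (Int × Int) Int) : Prop :=
  (∀ k, d.getD k 0 = pvCnt strides shape used k) ∧ d.keys.Nodup

theorem pv_set_cancel {used : List Bool} {j : Nat} (h : used.getD j true = false) :
    (used.set j true).set j false = used := by
  have hj : j < used.length := by
    by_contra hj
    rw [List.getD_eq_getElem?_getD, List.getElem?_eq_none (by omega)] at h
    simp at h
  have hv : used[j]? = some false := by
    rw [List.getD_eq_getElem?_getD, List.getElem?_eq_getElem hj] at h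
    rw [List.getElem?_eq_getElem hj]; simp_all
  rw [List.set_set]
  apply List.ext_getElem?
  intro i
  rw [List.getElem?_set]
  split
  · simp_all
  · rfl


theorem pvAInner_false_pres (rec : Int → Int → List Bool → Bool × List Bool)
    (hrec : ∀ c e u, (rec c e u).1 = false → (rec c e u).2 = u)
    (checked expected : Int) (strides shape : List Int) :
    ∀ js used, (pvAInner rec checked expected strides shape used js).1 = false →
      (pvAInner rec checked expected strides shape used js).2 = used := by
  intro js
  induction js with
  | nil => intro used h; simp [pvAInner]
  | cons j js ih =>
    intro used h
    by_cases hc : (used.getD j true = false ∧ strides.getD j 0 = expected ∧ strides.getD j 0 ≥ 0)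
    · by_cases ht : checked + 1 = (strides.length : Int)
      · simp only [pvAInner, if_pos hc, if_pos ht] at h
        exact Bool.noConfusion h
      · rcases hrw : rec (checked + 1) (expected * shape.getD j 0) (used.set j true) with ⟨b, u2⟩
        cases b
        · have hu2 : u2 = used.set j true := by
            have := hrec (checked + 1) (expected * shape.getD j 0) (used.set j true)
            rw [hrw] at this; exact this rfl
          have hrestore : u2.set j false = used := by rw [hu2]; exact pv_set_cancel hc.1
          have h' : (pvAInner rec checked expected strides shape (u2.set j false) js).1 = false := by
            simpa only [pvAInner, if_pos hc, if_neg ht, hrw] using h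
          have hres := ih (u2.set j false) h'
          simp only [pvAInner, if_pos hc, if_neg ht, hrw]
          rw [hres, hrestore]
        · simp only [pvAInner, if_pos hc, if_neg ht, hrw] at h
          exact Bool.noConfusion h
    · simp only [pvAInner, if_neg hc] at h ⊢
      exact ih used h

theorem pvAOuter_false_pres (rec : Int → Int → List Bool → Bool × List Bool)
    (hrec : ∀ c e u, (rec c e u).1 = false → (rec c e u).2 = u)
    (checked expected : Int) (strides shape : List Int) :
    ∀ i used, (pvAOuter rec checked expected strides shape used i).1 = false →
      (pvAOuter rec checked expected strides shape used i).2 = used := by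
  intro i
  induction i with
  | zero => intro used h; simp [pvAOuter]
  | succ i ih =>
    intro used h
    rcases hrw : pvAInner rec checked expected strides shape used (List.range strides.length) with ⟨b, u⟩
    cases b
    · have hu : u = used := by
        have := pvAInner_false_pres rec hrec checked expected strides shape (List.range strides.length) used
        rw [hrw] at this; exact this rfl
      have h' : (pvAOuter rec checked expected strides shape u i).1 = false := by
        simpa only [pvAOuter, hrw] using h
      rw [hu] at h'
      have hres := ih used h'
      simp only [pvAOuter, hrw, hu]
      exact hres
    · simp only [pvAOuter, hrw] at h
      exact Bool.noConfusion h
theorem pvAGo_false_pres (strides shape : List Int) :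
    ∀ fuel checked expected used, (pvAGo strides shape fuel checked expected used).1 = false →
      (pvAGo strides shape fuel checked expected used).2 = used := by
  intro fuel
  induction fuel with
  | zero => intro c e u h; simp [pvAGo]
  | succ fuel ih =>
    intro c e u h
    simp only [pvAGo] at h ⊢
    exact pvAOuter_false_pres _ (fun c e u => ih c e u) c e strides shape strides.length u h

theorem pvAInner_true_iff (rec : Int → Int → List Bool → Bool × List Bool)
    (hrec : ∀ c e u, (rec c e u).1 = false → (rec c e u).2 = u)
    (checked expected : Int) (strides shape : List Int) :
    ∀ js used, (pvAInner rec checked expected strides shape used js).1 = true ↔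
      ∃ j ∈ js, (used.getD j true = false ∧ strides.getD j 0 = expected ∧ strides.getD j 0 ≥ 0) ∧
        (checked + 1 = (strides.length : Int) ∨
          (rec (checked + 1) (expected * shape.getD j 0) (used.set j true)).1 = true) := by
  intro js
  induction js with
  | nil => intro used; simp [pvAInner]
  | cons j js ih =>
    intro used
    by_cases hc : (used.getD j true = false ∧ strides.getD j 0 = expected ∧ strides.getD j 0 ≥ 0)
    · by_cases ht : checked + 1 = (strides.length : Int)
      · simp only [pvAInner, if_pos hc, if_pos ht]
        constructor
        · intro _; exact ⟨j, List.mem_cons_self .., hc, Or.inl ht⟩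
        · intro _; trivial
      · rcases hrw : rec (checked + 1) (expected * shape.getD j 0) (used.set j true) with ⟨b, u2⟩
        cases b
        · have hu2 : u2 = used.set j true := by
            have := hrec (checked + 1) (expected * shape.getD j 0) (used.set j true)
            rw [hrw] at this; exact this rfl
          have hrestore : u2.set j false = used := by rw [hu2]; exact pv_set_cancel hc.1
          simp only [pvAInner, if_pos hc, if_neg ht, hrw, hrestore]
          rw [ih used]
          constructor
          · rintro ⟨j', hj', hcond, hd⟩; exact ⟨j', List.mem_cons_of_mem _ hj', hcond, hd⟩
          · rintro ⟨j', hj', hcond, hd⟩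
            rcases List.mem_cons.1 hj' with rfl | hj'
            · rcases hd with hd | hd
              · exact absurd hd ht
              · rw [hrw] at hd; exact Bool.noConfusion hd
            · exact ⟨j', hj', hcond, hd⟩
        · simp only [pvAInner, if_pos hc, if_neg ht, hrw]
          constructor
          · intro _; exact ⟨j, List.mem_cons_self .., hc, Or.inr (by rw [hrw])⟩
          · intro _; trivial
    · simp only [pvAInner, if_neg hc]
      rw [ih used]
      constructor
      · rintro ⟨j', hj', hcond, hd⟩; exact ⟨j', List.mem_cons_of_mem _ hj', hcond, hd⟩
      · rintro ⟨j', hj', hcond, hd⟩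
        rcases List.mem_cons.1 hj' with rfl | hj'
        · exact absurd hcond hc
        · exact ⟨j', hj', hcond, hd⟩

theorem pvAOuter_true_iff (rec : Int → Int → List Bool → Bool × List Bool)
    (hrec : ∀ c e u, (rec c e u).1 = false → (rec c e u).2 = u)
    (checked expected : Int) (strides shape : List Int) :
    ∀ i used, (pvAOuter rec checked expected strides shape used i).1 = true ↔
      (i ≠ 0 ∧ (pvAInner rec checked expected strides shape used (List.range strides.length)).1 = true) := by
  intro i
  induction i with
  | zero => intro used; simp [pvAOuter]
  | succ i ih =>
    intro used
    rcases hrw : pvAInner rec checked expected strides shape used (List.range strides.length) with ⟨b, u⟩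
    cases b
    · have hu : u = used := by
        have := pvAInner_false_pres rec hrec checked expected strides shape (List.range strides.length) used
        rw [hrw] at this; exact this rfl
      simp only [pvAOuter, hrw, hu]
      rw [ih used]
      simp [hrw]
    · simp only [pvAOuter, hrw]
      simp
theorem pv_pair_unique {α β : Type} [DecidableEq α] :
    ∀ (l : List (α × β)), (l.map Prod.fst).Nodup →
      ∀ p q : α × β, p ∈ l → q ∈ l → p.1 = q.1 → p = q := by
  intro l
  induction l with
  | nil => intro _ p q hp; simp at hp
  | cons a l ih =>
    intro hnd p q hp hq he
    simp only [List.map_cons, List.nodup_cons] at hnd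
    rcases List.mem_cons.1 hp with hpa | hp' <;> rcases List.mem_cons.1 hq with hqa | hq'
    · rw [hpa, hqa]
    · have hm1 : q.1 ∈ l.map Prod.fst := List.mem_map_of_mem hq'
      rw [← he, hpa] at hm1; exact absurd hm1 hnd.1
    · have hm1 : p.1 ∈ l.map Prod.fst := List.mem_map_of_mem hp'
      rw [he, hqa] at hm1; exact absurd hm1 hnd.1
    · exact ih hnd.2 p q hp' hq' he

theorem pv_insert_mem_self (d : PySem.Dict (Int × Int) Int) (k : Int × Int) (c : Int)
    (hnd : d.keys.Nodup) (hm : (k, c) ∈ d.items) : d.insert k c = d := by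
  have hcont : d.contains k = true := by
    rw [PySem.Dict.contains_iff_mem_keys]
    simpa [PySem.Dict.keys] using List.mem_map_of_mem (f := Prod.fst) hm
  apply PySem.Dict.ext
  rw [PySem.Dict.items_insert_of_contains _ _ hcont]
  have : ∀ p ∈ d.items, (if p.1 == k then (k, c) else p) = p := by
    intro p hp
    by_cases hk : p.1 = k
    · have : p = (k, c) := pv_pair_unique d.items hnd p (k, c) hp hm (by simp [hk])
      simp [this]
    · simp [hk]
  rw [List.map_congr_left this, List.map_id']
theorem pvBInner_false_pres
    (rec : Int → Int → PySem.Dict (Int × Int) Int → Bool × PySem.Dict (Int × Int) Int)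
    (hrec : ∀ c e d', PySem.Dict.keys d' |>.Nodup → (rec c e d').1 = false → (rec c e d').2 = d')
    (checked expected : Int) (n : Nat) (d : PySem.Dict (Int × Int) Int) (hnd : d.keys.Nodup) :
    ∀ items, (∀ p ∈ items, p ∈ d.items) →
      (pvBInner rec checked expected n d items).1 = false →
      (pvBInner rec checked expected n d items).2 = d := by
  intro items
  induction items with
  | nil => intro _ h; simp [pvBInner]
  | cons p items ih =>
    rcases p with ⟨⟨s, sh⟩, c⟩
    intro hsub h
    by_cases hc : (0 < c ∧ s = expected ∧ s ≥ 0)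
    · by_cases ht : checked + 1 = (n : Int)
      · simp only [pvBInner, if_pos hc, if_pos ht] at h
        exact Bool.noConfusion h
      · rcases hrw : rec (checked + 1) (expected * sh) (d.insert (s, sh) (c - 1)) with ⟨b, d2⟩
        cases b
        · have hd2 : d2 = d.insert (s, sh) (c - 1) := by
            have := hrec (checked + 1) (expected * sh) (d.insert (s, sh) (c - 1))
              (PySem.Dict.nodup_keys_insert d (s, sh) (c - 1) hnd)
            rw [hrw] at this; exact this rfl
          have hrestore : d2.insert (s, sh) c = d := by
            rw [hd2, PySem.Dict.insert_insert_self]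
            exact pv_insert_mem_self d (s, sh) c hnd (hsub _ (List.mem_cons_self ..))
          have h' : (pvBInner rec checked expected n (d2.insert (s, sh) c) items).1 = false := by
            simpa only [pvBInner, if_pos hc, if_neg ht, hrw] using h
          rw [hrestore] at h'
          have hres := ih (fun p hp => hsub p (List.mem_cons_of_mem _ hp)) h'
          simp only [pvBInner, if_pos hc, if_neg ht, hrw, hrestore]
          exact hres
        · simp only [pvBInner, if_pos hc, if_neg ht, hrw] at h
          exact Bool.noConfusion h
    · simp only [pvBInner, if_neg hc] at h ⊢
      exact ih (fun p hp => hsub p (List.mem_cons_of_mem _ hp)) h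

theorem pvBGo_false_pres (n : Nat) :
    ∀ fuel checked expected (d : PySem.Dict (Int × Int) Int), d.keys.Nodup →
      ((pvBGo n fuel checked expected d).1 = false → (pvBGo n fuel checked expected d).2 = d) := by
  intro fuel
  induction fuel with
  | zero => intro c e d _ h; simp [pvBGo]
  | succ fuel ih =>
    intro c e d hnd h
    simp only [pvBGo] at h ⊢
    exact pvBInner_false_pres _ (fun c e d' hnd' h' => ih c e d' hnd' h') c e n d hnd d.items
      (fun p hp => hp) h

theorem pvBInner_true_iff
    (rec : Int → Int → PySem.Dict (Int × Int) Int → Bool × PySem.Dict (Int × Int) Int)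
    (hrec : ∀ c e d', PySem.Dict.keys d' |>.Nodup → (rec c e d').1 = false → (rec c e d').2 = d')
    (checked expected : Int) (n : Nat) (d : PySem.Dict (Int × Int) Int) (hnd : d.keys.Nodup) :
    ∀ items, (∀ p ∈ items, p ∈ d.items) →
      ((pvBInner rec checked expected n d items).1 = true ↔
        ∃ p ∈ items, 0 < p.2 ∧ p.1.1 = expected ∧ p.1.1 ≥ 0 ∧
          (checked + 1 = (n : Int) ∨
            (rec (checked + 1) (expected * p.1.2) (d.insert p.1 (p.2 - 1))).1 = true)) := by
  intro items
  induction items with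
  | nil => intro _; simp [pvBInner]
  | cons p items ih =>
    rcases p with ⟨⟨s, sh⟩, c⟩
    intro hsub
    by_cases hc : (0 < c ∧ s = expected ∧ s ≥ 0)
    · by_cases ht : checked + 1 = (n : Int)
      · simp only [pvBInner, if_pos hc, if_pos ht]
        constructor
        · intro _
          exact ⟨((s, sh), c), List.mem_cons_self .., hc.1, hc.2.1, hc.2.2, Or.inl ht⟩
        · intro _; trivial
      · rcases hrw : rec (checked + 1) (expected * sh) (d.insert (s, sh) (c - 1)) with ⟨b, d2⟩
        cases b
        · have hd2 : d2 = d.insert (s, sh) (c - 1) := by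
            have := hrec (checked + 1) (expected * sh) (d.insert (s, sh) (c - 1))
              (PySem.Dict.nodup_keys_insert d (s, sh) (c - 1) hnd)
            rw [hrw] at this; exact this rfl
          have hrestore : d2.insert (s, sh) c = d := by
            rw [hd2, PySem.Dict.insert_insert_self]
            exact pv_insert_mem_self d (s, sh) c hnd (hsub _ (List.mem_cons_self ..))
          simp only [pvBInner, if_pos hc, if_neg ht, hrw, hrestore]
          rw [ih (fun p hp => hsub p (List.mem_cons_of_mem _ hp))]
          constructor
          · rintro ⟨p, hp, hcond⟩; exact ⟨p, List.mem_cons_of_mem _ hp, hcond⟩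
          · rintro ⟨p, hp, h1, h2, h3, hd⟩
            rcases List.mem_cons.1 hp with rfl | hp
            · rcases hd with hd | hd
              · exact absurd hd ht
              · rw [hrw] at hd; exact Bool.noConfusion hd
            · exact ⟨p, hp, h1, h2, h3, hd⟩
        · simp only [pvBInner, if_pos hc, if_neg ht, hrw]
          constructor
          · intro _
            exact ⟨((s, sh), c), List.mem_cons_self .., hc.1, hc.2.1, hc.2.2,
              Or.inr (by rw [hrw])⟩
          · intro _; trivial
    · simp only [pvBInner, if_neg hc]
      rw [ih (fun p hp => hsub p (List.mem_cons_of_mem _ hp))]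
      constructor
      · rintro ⟨p, hp, hcond⟩; exact ⟨p, List.mem_cons_of_mem _ hp, hcond⟩
      · rintro ⟨p, hp, h1, h2, h3, hd⟩
        rcases List.mem_cons.1 hp with rfl | hp
        · exact absurd ⟨h1, h2, h3⟩ hc
        · exact ⟨p, hp, h1, h2, h3, hd⟩

theorem pvCnt_set (strides shape : List Int) (used : List Bool) (j : Nat)
    (hj : j < strides.length) (hu : used.getD j true = false) (k' : Int × Int) :
    pvCnt strides shape (used.set j true) k' =
      pvCnt strides shape used k' - (if pvKey strides shape j = k' then 1 else 0) := by
  have hlen : j < used.length := by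
    by_contra hl
    rw [List.getD_eq_getElem?_getD, List.getElem?_eq_none (by omega)] at hu
    simp at hu
  have hjm : j ∈ List.range strides.length := List.mem_range.2 hj
  have hperm : (List.range strides.length).Perm (j :: (List.range strides.length).erase j) :=
    List.perm_cons_erase hjm
  have hne : ∀ i ∈ (List.range strides.length).erase j, i ≠ j := by
    intro i hi
    exact ((List.Nodup.mem_erase_iff (List.nodup_range)).1 hi).1
  have hagree : ∀ i ∈ (List.range strides.length).erase j,
      (!(used.set j true).getD i true && decide (pvKey strides shape i = k')) =
      (!used.getD i true && decide (pvKey strides shape i = k')) := by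
    intro i hi
    have : (used.set j true).getD i true = used.getD i true := by
      rw [List.getD_eq_getElem?_getD, List.getD_eq_getElem?_getD,
        List.getElem?_set_ne (Ne.symm (hne i hi))]
    rw [this]
  have hnew : (used.set j true).getD j true = true := by
    rw [List.getD_eq_getElem?_getD, List.getElem?_set_self' ]
    simp [hlen]
  unfold pvCnt
  rw [hperm.countP_eq, hperm.countP_eq, List.countP_cons, List.countP_cons,
    List.countP_congr (fun i hi => by rw [hagree i hi])]
  rw [hnew, hu]
  simp only [Bool.not_true, Bool.not_false, Bool.false_and, Bool.true_and]
  by_cases hk : pvKey strides shape j = k'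
  · simp [hk]
  · simp [hk]

theorem pvCnt_pos_iff (strides shape : List Int) (used : List Bool) (k : Int × Int) :
    0 < pvCnt strides shape used k ↔
      ∃ j, j < strides.length ∧ used.getD j true = false ∧ pvKey strides shape j = k := by
  unfold pvCnt
  rw [Int.natCast_pos, List.countP_pos_iff]
  constructor
  · rintro ⟨j, hj, hp⟩
    simp only [Bool.and_eq_true, Bool.not_eq_true', decide_eq_true_eq] at hp
    exact ⟨j, List.mem_range.1 hj, hp.1, hp.2⟩
  · rintro ⟨j, hj, h1, h2⟩
    exact ⟨j, List.mem_range.2 hj, by rw [List.getD_eq_getElem?_getD] at h1; simp [h1, h2]⟩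

theorem pvR_step (strides shape : List Int) {used : List Bool}
    {d : PySem.Dict (Int × Int) Int} {j : Nat} (hR : pvR strides shape used d)
    (hj : j < strides.length) (hu : used.getD j true = false) :
    pvR strides shape (used.set j true)
      (d.insert (pvKey strides shape j) (d.getD (pvKey strides shape j) 0 - 1)) := by
  constructor
  · intro k'
    rw [PySem.Dict.getD_insert, pvCnt_set strides shape used j hj hu k',
      hR.1 k', hR.1 (pvKey strides shape j)]
    by_cases h : k' = pvKey strides shape j
    · simp [h]
    · simp [h, Ne.symm h]
  · exact PySem.Dict.nodup_keys_insert _ _ _ hR.2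

theorem pvBuildAvail_getD (strides shape : List Int) (used : List Bool) :
    ∀ (js : List Nat) (d : PySem.Dict (Int × Int) Int) (k : Int × Int),
      ((js.foldl (fun d j =>
          if used.getD j true = false then
            d.insert (strides.getD j 0, shape.getD j 0)
              (d.getD (strides.getD j 0, shape.getD j 0) 0 + 1)
          else d) d).getD k 0) =
        d.getD k 0 + (js.countP (fun j => !used.getD j true && decide (pvKey strides shape j = k)) : Int) := by
  intro js
  induction js with
  | nil => intro d k; simp
  | cons j js ih =>
    intro d k
    simp only [List.foldl_cons, List.countP_cons]
    by_cases hu : used.getD j true = false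
    · rw [if_pos hu, ih]
      rw [PySem.Dict.getD_insert]
      by_cases hk : pvKey strides shape j = k
      · have : k = (strides.getD j 0, shape.getD j 0) := by rw [← hk]; rfl
        rw [if_pos this]
        simp only [hu, hk, Bool.not_false, decide_true, Bool.and_true]
        unfold pvKey at this
        rw [← this]
        push_cast
        ring
      · have : ¬ (k = (strides.getD j 0, shape.getD j 0)) := fun hh => hk (by rw [hh]; rfl)
        rw [if_neg this]
        simp [hk]
    · rw [if_neg hu]
      have : (!used.getD j true && decide (pvKey strides shape j = k)) = false := by
        cases hb : used.getD j true
        · exact absurd hb hu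
        · simp
      rw [this, ih]
      simp

theorem pv_main (strides shape : List Int) :
    ∀ fuel checked expected used d, pvR strides shape used d →
      (pvAGo strides shape fuel checked expected used).1 =
        (pvBGo strides.length fuel checked expected d).1 := by
  intro fuel
  induction fuel with
  | zero => intro c e u d _; rfl
  | succ fuel ih =>
    intro checked expected used d hR
    have hndd := hR.2
    have hArec : ∀ c e u, (pvAGo strides shape fuel c e u).1 = false →
        (pvAGo strides shape fuel c e u).2 = u := pvAGo_false_pres strides shape fuel
    have hBrec : ∀ c e d', (PySem.Dict.keys d').Nodup →
        ((pvBGo strides.length fuel c e d').1 = false →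
          (pvBGo strides.length fuel c e d').2 = d') :=
      fun c e d' hnd' => pvBGo_false_pres strides.length fuel c e d' hnd'
    simp only [pvAGo, pvBGo]
    rw [Bool.eq_iff_iff]
    rw [pvAOuter_true_iff _ hArec checked expected strides shape strides.length used,
      pvAInner_true_iff _ hArec checked expected strides shape (List.range strides.length) used,
      pvBInner_true_iff _ hBrec checked expected strides.length d hndd d.items (fun p hp => hp)]
    constructor
    · rintro ⟨_, j, hjm, hcond, hdisj⟩
      have hj : j < strides.length := List.mem_range.1 hjm
      have hcpos : 0 < d.getD (pvKey strides shape j) 0 := by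
        rw [hR.1 (pvKey strides shape j)]
        exact (pvCnt_pos_iff strides shape used (pvKey strides shape j)).2 ⟨j, hj, hcond.1, rfl⟩
      have hmem : (pvKey strides shape j, d.getD (pvKey strides shape j) 0) ∈ d.items := by
        have hcont : d.contains (pvKey strides shape j) = true := by
          by_contra hct
          have h0 := PySem.Dict.getD_of_not_contains d 0
            (by simpa using hct : d.contains (pvKey strides shape j) = false)
          rw [h0] at hcpos
          exact lt_irrefl _ hcpos
        obtain ⟨v, hv⟩ : ∃ v, d.get? (pvKey strides shape j) = some v := by
          cases hg : d.get? (pvKey strides shape j) with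
          | none =>
            rw [PySem.Dict.get?_eq_none_iff_contains] at hg
            rw [hg] at hcont; exact Bool.noConfusion hcont
          | some v => exact ⟨v, rfl⟩
        have hveq : d.getD (pvKey strides shape j) 0 = v := by
          rw [PySem.Dict.getD_eq_get?_getD, hv]; rfl
        rw [hveq]
        exact PySem.Dict.mem_items_of_get?_eq_some d hv
      refine ⟨(pvKey strides shape j, d.getD (pvKey strides shape j) 0), hmem, hcpos,
        hcond.2.1, hcond.2.2, ?_⟩
      rcases hdisj with h | h
      · exact Or.inl h
      · right
        have hih := ih (checked + 1) (expected * shape.getD j 0) (used.set j true)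
          (d.insert (pvKey strides shape j) (d.getD (pvKey strides shape j) 0 - 1))
          (pvR_step strides shape hR hj hcond.1)
        simp only [pvKey] at hih ⊢
        rw [← hih]
        exact h
    · rintro ⟨⟨k, c⟩, hmem, hcpos, hs1, hs2, hdisj⟩
      have hceq : d.getD k 0 = c := PySem.Dict.getD_of_mem_items d hmem hndd 0
      have hcnt : 0 < pvCnt strides shape used k := by rw [← hR.1 k, hceq]; exact hcpos
      obtain ⟨j, hj, hu, hk⟩ := (pvCnt_pos_iff strides shape used k).1 hcnt
      have hk1 : strides.getD j 0 = k.1 := congrArg Prod.fst hk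
      have hk2 : shape.getD j 0 = k.2 := congrArg Prod.snd hk
      refine ⟨by omega, j, List.mem_range.2 hj, ⟨hu, by rw [hk1]; exact hs1,
        by rw [hk1]; exact hs2⟩, ?_⟩
      rcases hdisj with h | h
      · exact Or.inl h
      · right
        have hih := ih (checked + 1) (expected * shape.getD j 0) (used.set j true)
          (d.insert (pvKey strides shape j) (d.getD (pvKey strides shape j) 0 - 1))
          (pvR_step strides shape hR hj hu)
        rw [hih]
        unfold pvKey
        rw [hk1, hk2]
        have : d.getD (k.1, k.2) 0 = c := by
          have : (k.1, k.2) = k := rfl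
          rw [this, hceq]
        rw [this]
        exact h

theorem pv_fold_nodup (strides shape : List Int) (used : List Bool) :
    ∀ (js : List Nat) (d : PySem.Dict (Int × Int) Int), d.keys.Nodup →
      ((js.foldl (fun d j =>
          if used.getD j true = false then
            d.insert (strides.getD j 0, shape.getD j 0)
              (d.getD (strides.getD j 0, shape.getD j 0) 0 + 1)
          else d) d).keys.Nodup) := by
  intro js
  induction js with
  | nil => intro d h; simpa using h
  | cons j js ih =>
    intro d h
    simp only [List.foldl_cons]
    by_cases hu : used.getD j true = false
    · rw [if_pos hu]
      exact ih _ (PySem.Dict.nodup_keys_insert _ _ _ h)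
    · rw [if_neg hu]
      exact ih _ h

theorem pvBuildAvail_R (strides shape : List Int) (used : List Bool) :
    pvR strides shape used (pvBuildAvail strides shape used) := by
  constructor
  · intro k
    unfold pvBuildAvail pvCnt
    rw [pvBuildAvail_getD strides shape used (List.range strides.length) PySem.Dict.empty k]
    simp [PySem.Dict.getD_empty]
  · unfold pvBuildAvail
    exact pv_fold_nodup strides shape used (List.range strides.length) PySem.Dict.empty
      PySem.Dict.nodup_keys_empty

-- ===== VERDICT (by name: the statement is the Claim_ definition above) =====
theorem lmad_contiguous_search_spec : Claim_equal_lmad_contiguous_search := by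
  intro checked expected strides shape used _ _
  unfold Spec_lmad_contiguous_search lmad_contiguous_search lmad_contiguous_search_alt
  exact pv_main strides shape _ checked expected used _ (pvBuildAvail_R strides shape used)
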